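-- pv_equiv track=rewrite | github.com/redjadet/flutter_bloc_app | tool/check_dialog_text_controller_lifecycle.py | _skip_string_or_comment
-- ===== SOURCE A (Python) =====
-- def _skip_string_or_comment(s: str, i: int) -> int:
--     """Advance i past a comment or string starting at s[i]; return new index (exclusive end)."""
--     n = len(s)
--     if i >= n:
--         return i
--     if s[i] == "/" and i + 1 < n:
--         if s[i + 1] == "/":
--             j = s.find("\n", i)
--             return n if j == -1 else j + 1
--         if s[i + 1] == "*":
--             j = s.find("*/", i + 2)
--             return n if j == -1 else j + 2
--     if s[i] == "r" and i + 1 < n and s[i + 1] in "'\"":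
--         i += 1
--     if s[i] in "'\"":
--         quote = s[i]
--         if quote in "\"'" and i + 2 < n and s[i : i + 3] == quote * 3:
--             end = s.find(quote * 3, i + 3)
--             return n if end == -1 else end + 3
--         i += 1
--         while i < n:
--             if s[i] == "\\" and i + 1 < n:
--                 i += 2
--                 continue
--             if s[i] == quote:
--                 return i + 1
--             i += 1
--         return n
--     return i
-- ===== SOURCE B (Python) =====
-- def _scan_plain(tail, quote):
--     """Chars of `tail` consumed through the closing quote, or None if unterminated.
--     Jumps with str.find instead of walking char by char."""
--     consumed = 0
--     while True:
--         q = tail.find(quote)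
--         if q == -1:
--             return None
--         b = tail.find("\\")
--         if b != -1 and b < q:
--             consumed += b + 2
--             tail = tail[b + 2:]
--         else:
--             return consumed + q + 1
--
--
-- def _skip_string_or_comment(s: str, i: int) -> int:
--     """Advance i past a comment or string starting at s[i]; return new index (exclusive end)."""
--     n = len(s)
--     if i >= n:
--         return i
--     head = s[i]
--     nxt = s[i + 1] if i + 1 < n else ""
--     if head == "/" and nxt == "/":
--         nl = s.find("\n", i)
--         return n if nl == -1 else nl + 1
--     if head == "/" and nxt == "*":
--         close = s.find("*/", i + 2)
--         return n if close == -1 else close + 2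
--     start = i + 1 if head == "r" and nxt in "'\"" and nxt else i
--     quote = s[start]
--     if quote not in "'\"":
--         return i
--     if s[start:start + 3] == quote * 3:
--         end = s.find(quote * 3, start + 3)
--         return n if end == -1 else end + 3
--     body = _scan_plain(s[start + 1:], quote)
--     return n if body is None else start + 1 + body
-- ===== Notes on version B (the rewrite author's own statement) =====
-- stated objective: alternative
-- what changed: B replaces A's char-by-char while-loop over string bodies with a find-and-jump scan over the remaining suffix (locating the next quote and next backslash with str.find and skipping escapes in one jump), and flattens A's nested comment dispatch into a single head/next-char table.
-- outside the precondition, e.g. on _skip_string_or_comment("'/", -2): A returns 1, B returns 2; on _skip_string_or_comment('x"y"z', -4): A returns -1, B returns -1; on _skip_string_or_comment('ab', -5): A raises IndexError, B raises IndexError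
import Mathlib
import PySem

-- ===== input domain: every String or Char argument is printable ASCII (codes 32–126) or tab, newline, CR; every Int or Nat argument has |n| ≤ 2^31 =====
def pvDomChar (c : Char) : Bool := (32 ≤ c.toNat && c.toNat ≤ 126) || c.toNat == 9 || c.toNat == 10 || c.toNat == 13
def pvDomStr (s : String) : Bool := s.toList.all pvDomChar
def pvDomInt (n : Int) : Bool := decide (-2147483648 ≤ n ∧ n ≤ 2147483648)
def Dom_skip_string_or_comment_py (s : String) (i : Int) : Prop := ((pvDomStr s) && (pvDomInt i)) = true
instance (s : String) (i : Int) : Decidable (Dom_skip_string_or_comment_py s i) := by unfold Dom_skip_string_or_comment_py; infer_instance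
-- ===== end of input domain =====

-- B re-implements the string-body scan by jumping with str.find over the suffix instead of
-- walking char by char, and flattens the dispatch; equivalence is proved for 0 ≤ i (Pre_).

-- ===== PORT A =====
-- A's `while i < n` string-body loop, step for step (indices are Python ints).
-- s[i] is ported as pyGetD: exact wherever Python's s[i] returns (Pre_ gives 0 ≤ i < n at every use).
def pvAScan (cs : List Char) (quote : Char) (i : Int) : Int :=
  if _h : i < (cs.length : Int) then
    if PySem.List.pyGetD cs i ' ' = '\\' ∧ i + 1 < (cs.length : Int) then
      pvAScan cs quote (i + 2)
    else if PySem.List.pyGetD cs i ' ' = quote then i + 1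
    else pvAScan cs quote (i + 1)
  else (cs.length : Int)
termination_by ((cs.length : Int) - i).toNat
decreasing_by all_goals omega

-- A's code from the `if s[i] == "r"` line on (the fall-through after the comment branches).
def pvARest (cs : List Char) (i0 : Int) : Int :=
  let n : Int := cs.length
  let i := if PySem.List.pyGetD cs i0 ' ' = 'r' ∧ i0 + 1 < n ∧
              (PySem.List.pyGetD cs (i0 + 1) ' ' = '\'' ∨ PySem.List.pyGetD cs (i0 + 1) ' ' = '"') then
             i0 + 1 else i0
  let c := PySem.List.pyGetD cs i ' '
  if c = '\'' ∨ c = '"' then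
    if (c = '"' ∨ c = '\'') ∧ i + 2 < n ∧ PySem.List.slice cs (some i) (some (i + 3)) = [c, c, c] then
      let e := PySem.Chars.findFrom cs [c, c, c] (i + 3) none
      if e = -1 then n else e + 3
    else pvAScan cs c (i + 1)
  else i

def skip_string_or_comment_py (s : String) (i : Int) : Int :=
  let cs := s.toList
  let n : Int := cs.length
  if i ≥ n then i
  else if PySem.List.pyGetD cs i ' ' = '/' ∧ i + 1 < n then
    if PySem.List.pyGetD cs (i + 1) ' ' = '/' then
      let j := PySem.Chars.findFrom cs ['\n'] i none
      if j = -1 then n else j + 1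
    else if PySem.List.pyGetD cs (i + 1) ' ' = '*' then
      let j := PySem.Chars.findFrom cs ['*', '/'] (i + 2) none
      if j = -1 then n else j + 2
    else pvARest cs i
  else pvARest cs i

-- ===== PORT B =====
-- Source B's `_scan_plain` while-loop: state (tail, consumed), jumps via str.find.
def pvBScan (tail : List Char) (quote : Char) (consumed : Int) : Option Int :=
  let q := PySem.Chars.find tail [quote]
  if q = -1 then none
  else
    let b := PySem.Chars.find tail ['\\']
    if b ≠ -1 ∧ b < q then pvBScan (tail.drop (b.toNat + 2)) quote (consumed + b + 2)
    else some (consumed + q + 1)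
termination_by tail.length
decreasing_by
  have h1 := PySem.Chars.neg_one_le_find tail ['\\']
  have h2 := PySem.Chars.find_le_length tail [quote]
  simp only [List.length_drop]
  omega

-- Source B after the comment branches (nxt = "" is modeled as none).
def pvBTail (cs : List Char) (i : Int) (head : Char) (nxt : Option Char) : Int :=
  let n : Int := cs.length
  let start := if head = 'r' ∧ (nxt = some '\'' ∨ nxt = some '"') then i + 1 else i
  let quote := PySem.List.pyGetD cs start ' '
  if ¬(quote = '\'' ∨ quote = '"') then i
  else if PySem.List.slice cs (some start) (some (start + 3)) = [quote, quote, quote] then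
    let e := PySem.Chars.findFrom cs [quote, quote, quote] (start + 3) none
    if e = -1 then n else e + 3
  else
    -- Source B: `return n if body is None else start + 1 + body`
    (pvBScan (PySem.List.slice cs (some (start + 1)) none) quote 0).elim n
      (fun body => start + 1 + body)

def skip_string_or_comment_py_alt (s : String) (i : Int) : Int :=
  let cs := s.toList
  let n : Int := cs.length
  if i ≥ n then i
  else
    let head := PySem.List.pyGetD cs i ' '
    let nxt := if i + 1 < n then some (PySem.List.pyGetD cs (i + 1) ' ') else none
    if head = '/' ∧ nxt = some '/' then
      let nl := PySem.Chars.findFrom cs ['\n'] i none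
      if nl = -1 then n else nl + 1
    else if head = '/' ∧ nxt = some '*' then
      let close := PySem.Chars.findFrom cs ['*', '/'] (i + 2) none
      if close = -1 then n else close + 2
    else pvBTail cs i head nxt

-- ===== PRECONDITION & SPEC =====
-- Pre_ excludes negative indices: they are outside the natural domain of a scanner position —
-- Python's negative-index wraparound makes A return accidental values there (and raise for i < -len(s)).
def Pre_skip_string_or_comment_py (s : String) (i : Int) : Prop := 0 ≤ i
instance (s : String) (i : Int) : Decidable (Pre_skip_string_or_comment_py s i) := by
  unfold Pre_skip_string_or_comment_py; infer_instance

def pvWitness_skip_string_or_comment_py : String × Int := ("r'a'", 0)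

def Spec_skip_string_or_comment_py (s : String) (i : Int) (out : Int) : Prop :=
  out = skip_string_or_comment_py_alt s i
instance (s : String) (i : Int) (out : Int) : Decidable (Spec_skip_string_or_comment_py s i out) := by
  unfold Spec_skip_string_or_comment_py; infer_instance

-- ===== CLAIM (what is proved, stated in full; the proofs are below) =====
def Claim_equal_skip_string_or_comment_py : Prop := ∀ (s : String) (i : Int), Dom_skip_string_or_comment_py s i → Pre_skip_string_or_comment_py s i → Spec_skip_string_or_comment_py s i (skip_string_or_comment_py s i)

-- ===== LEMMAS AND PROOFS =====

-- reference form of the plain-string body scan: chars consumed through the closing quote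
def pvScanRef (q : Char) : List Char → Option Int
  | [] => none
  | c :: rest =>
    if c = '\\' ∧ rest ≠ [] then (pvScanRef q rest.tail).map (· + 2)
    else if c = q then some 1
    else (pvScanRef q rest).map (· + 1)
termination_by l => l.length
decreasing_by
  all_goals simp only [List.length_tail, List.length_cons]
  all_goals omega

lemma pvSingletonInfix (x : Char) (l : List Char) : [x] <:+: l ↔ x ∈ l := by
  constructor
  · intro h; exact h.mem (by simp)
  · intro h
    obtain ⟨l1, l2, rfl⟩ := List.append_of_mem h
    exact ⟨l1, l2, by simp⟩

lemma pvFindEq (s sub : List Char) (m : ℕ) (hpre : sub <+: s.drop m)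
    (hmin : ∀ i < m, ¬ sub <+: s.drop i) : PySem.Chars.find s sub = m := by
  have hinf : sub <:+: s := hpre.isInfix.trans (List.drop_suffix m s).isInfix
  have hge : 0 ≤ PySem.Chars.find s sub := (PySem.Chars.find_nonneg_iff s sub).2 hinf
  obtain ⟨h1, h2⟩ := PySem.Chars.find_spec hge
  rcases lt_trichotomy (PySem.Chars.find s sub).toNat m with h | h | h
  · exact absurd h1 (hmin _ h)
  · omega
  · exact absurd hpre (h2 m h)

lemma pvFindNil (x : Char) : PySem.Chars.find [] [x] = -1 := by
  rw [PySem.Chars.find_eq_neg_one_iff, pvSingletonInfix]; simp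

lemma pvFindCons (x c : Char) (cs : List Char) :
    PySem.Chars.find (c :: cs) [x] =
      if c = x then 0
      else if PySem.Chars.find cs [x] = -1 then -1 else 1 + PySem.Chars.find cs [x] := by
  by_cases hcx : c = x
  · subst hcx
    rw [if_pos rfl]
    exact pvFindEq _ _ 0 (by simp) (fun i hi => absurd hi (by omega))
  · rw [if_neg hcx]
    by_cases hcs : PySem.Chars.find cs [x] = -1
    · rw [if_pos hcs, PySem.Chars.find_eq_neg_one_iff, pvSingletonInfix]
      rw [PySem.Chars.find_eq_neg_one_iff, pvSingletonInfix] at hcs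
      simp [hcs, Ne.symm hcx]
    · rw [if_neg hcs]
      have hge : 0 ≤ PySem.Chars.find cs [x] := by
        have := PySem.Chars.neg_one_le_find cs [x]; omega
      obtain ⟨h1, h2⟩ := PySem.Chars.find_spec hge
      have := pvFindEq (c :: cs) [x] ((PySem.Chars.find cs [x]).toNat + 1)
        (by simpa using h1)
        (by
          intro j hj
          cases j with
          | zero =>
            simp only [List.drop_zero]
            intro hp
            obtain ⟨t, ht⟩ := hp
            simp only [List.cons_append, List.cons.injEq] at ht
            exact hcx ht.1.symm
          | succ j' => simpa using h2 j' (by omega))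
      omega

-- no closing quote in the list → the reference scan is unterminated
lemma pvScanRefNoneAux (q : Char) : ∀ (m : ℕ) (l : List Char), l.length = m → q ∉ l →
    pvScanRef q l = none := by
  intro m
  induction m using Nat.strong_induction_on with
  | _ m ih =>
    intro l hm h
    match l with
    | [] => simp [pvScanRef]
    | c :: rest =>
      have hcq : ¬ c = q := by rintro rfl; exact h (by simp)
      have hrest : q ∉ rest := fun hm' => h (by simp [hm'])
      rw [pvScanRef]
      by_cases hg : c = '\\' ∧ rest ≠ []
      · have h1 : rest.tail.length < m := by
          cases rest with
          | nil => exact absurd rfl hg.2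
          | cons d r => simp at hm ⊢; omega
        rw [if_pos hg, ih _ h1 _ rfl (fun hm' => hrest (List.mem_of_mem_tail hm'))]
        simp
      · rw [if_neg hg, if_neg hcq, ih _ (by simp at hm; omega) _ rfl hrest]
        simp

lemma pvScanRefNone (q : Char) (l : List Char) (h : q ∉ l) : pvScanRef q l = none :=
  pvScanRefNoneAux q l.length l rfl h

-- stepping pvBScan over an ordinary character
lemma pvBScanStep (c q : Char) (rest : List Char) (consumed : Int)
    (hcq : c ≠ q) (hcb : c ≠ '\\') :
    pvBScan (c :: rest) q consumed = pvBScan rest q (consumed + 1) := by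
  have hQ := pvFindCons q c rest
  rw [if_neg hcq] at hQ
  have hB := pvFindCons '\\' c rest
  rw [if_neg hcb] at hB
  rw [pvBScan, pvBScan, hQ, hB]
  by_cases hq : PySem.Chars.find rest [q] = -1
  · simp [hq]
  · have hq0 : 0 ≤ PySem.Chars.find rest [q] := by
      have := PySem.Chars.neg_one_le_find rest [q]; omega
    rw [if_neg hq]
    by_cases hb : PySem.Chars.find rest ['\\'] = -1
    · rw [if_pos hb]
      rw [if_neg (show ¬(1 + PySem.Chars.find rest [q] = -1) by omega)]
      rw [if_neg (show ¬((-1 : Int) ≠ -1 ∧ (-1 : Int) < 1 + PySem.Chars.find rest [q]) by simp)]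
      rw [if_neg hq, if_neg (show ¬(PySem.Chars.find rest ['\\'] ≠ -1 ∧
            PySem.Chars.find rest ['\\'] < PySem.Chars.find rest [q]) from fun h => h.1 hb)]
      simp only [Option.some.injEq]; omega
    · have hb0 : 0 ≤ PySem.Chars.find rest ['\\'] := by
        have := PySem.Chars.neg_one_le_find rest ['\\']; omega
      rw [if_neg hb]
      rw [if_neg (show ¬(1 + PySem.Chars.find rest [q] = -1) by omega), if_neg hq]
      by_cases hlt : PySem.Chars.find rest ['\\'] < PySem.Chars.find rest [q]
      · rw [if_pos (show (1 + PySem.Chars.find rest ['\\'] ≠ -1 ∧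
              1 + PySem.Chars.find rest ['\\'] < 1 + PySem.Chars.find rest [q]) by
            constructor <;> omega)]
        rw [if_pos ⟨hb, hlt⟩]
        have hdrop : (1 + PySem.Chars.find rest ['\\']).toNat + 2
            = ((PySem.Chars.find rest ['\\']).toNat + 2) + 1 := by omega
        rw [hdrop, List.drop_succ_cons]
        have harg : consumed + (1 + PySem.Chars.find rest ['\\']) + 2
            = consumed + 1 + PySem.Chars.find rest ['\\'] + 2 := by ring
        rw [harg]
      · rw [if_neg (show ¬(1 + PySem.Chars.find rest ['\\'] ≠ -1 ∧
              1 + PySem.Chars.find rest ['\\'] < 1 + PySem.Chars.find rest [q]) from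
            fun h => hlt (by omega))]
        rw [if_neg (show ¬(PySem.Chars.find rest ['\\'] ≠ -1 ∧
              PySem.Chars.find rest ['\\'] < PySem.Chars.find rest [q]) from fun h => hlt h.2)]
        simp only [Option.some.injEq]; omega

-- pvBScan computes the reference scan plus the accumulator
lemma pvBScanRefAux (q : Char) (hq : q ≠ '\\') :
    ∀ (m : ℕ) (tail : List Char), tail.length = m → ∀ (consumed : Int),
      pvBScan tail q consumed = (pvScanRef q tail).map (consumed + ·) := by
  intro m
  induction m using Nat.strong_induction_on with
  | _ m ih =>
    intro tail hm consumed
    match tail with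
    | [] => rw [pvBScan]; simp [pvFindNil, pvScanRef]
    | c :: rest =>
      by_cases hcq : c = q
      · subst hcq
        have hfq : PySem.Chars.find (c :: rest) [c] = 0 := by rw [pvFindCons]; simp
        have hr := PySem.Chars.neg_one_le_find rest ['\\']
        have hfbne : PySem.Chars.find (c :: rest) ['\\'] ≠ 0 ∧
            -1 ≤ PySem.Chars.find (c :: rest) ['\\'] := by
          rw [pvFindCons]
          constructor
          · split
            · next h => exact absurd h hq
            · split <;> omega
          · split
            · omega
            · split <;> omega
        rw [pvBScan, hfq]
        rw [if_neg (show ¬((0 : Int) = -1) by omega)]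
        rw [if_neg (show ¬(PySem.Chars.find (c :: rest) ['\\'] ≠ -1 ∧
              PySem.Chars.find (c :: rest) ['\\'] < 0) from fun h => by
            rcases hfbne with ⟨h1, h2⟩
            rcases h with ⟨h3, h4⟩
            omega)]
        rw [pvScanRef, if_neg (show ¬(c = '\\' ∧ rest ≠ []) from fun h => hq h.1), if_pos rfl]
        simp only [Option.map_some, Option.some.injEq]; omega
      · by_cases hcb : c = '\\'
        · subst hcb
          have hfq := pvFindCons q '\\' rest
          rw [if_neg hcq] at hfq
          by_cases hqr : PySem.Chars.find rest [q] = -1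
          · rw [pvBScan, hfq, if_pos (by rw [if_pos hqr])]
            have hnone : pvScanRef q ('\\' :: rest) = none := by
              apply pvScanRefNone
              rw [PySem.Chars.find_eq_neg_one_iff, pvSingletonInfix] at hqr
              simp only [List.mem_cons, not_or]
              exact ⟨hq, hqr⟩
            rw [hnone]; simp
          · have hq0 : 0 ≤ PySem.Chars.find rest [q] := by
              have := PySem.Chars.neg_one_le_find rest [q]; omega
            have hrest : rest ≠ [] := by
              intro h; subst h; exact hqr (pvFindNil q)
            have hfb : PySem.Chars.find ('\\' :: rest) ['\\'] = 0 := by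
              rw [pvFindCons]; simp
            rw [pvBScan, hfq, hfb, if_neg hqr]
            rw [if_neg (show ¬(1 + PySem.Chars.find rest [q] = -1) by omega)]
            rw [if_pos (show ((0 : Int) ≠ -1 ∧ (0 : Int) < 1 + PySem.Chars.find rest [q]) by
              constructor <;> omega)]
            have hdrop : ('\\' :: rest).drop ((0 : Int).toNat + 2) = rest.tail := by
              cases rest with
              | nil => simp at hrest
              | cons d r => simp
            rw [hdrop]
            have hlen : rest.tail.length < m := by
              cases rest with
              | nil => simp at hrest
              | cons d r => simp at hm ⊢; omega
            rw [ih _ hlen _ rfl]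
            rw [pvScanRef, if_pos ⟨rfl, hrest⟩]
            cases pvScanRef q rest.tail with
            | none => simp
            | some v => simp only [Option.map_some, Option.some.injEq]; omega
        · rw [pvBScanStep c q rest consumed hcq hcb]
          have hlen : rest.length < m := by simp at hm; omega
          rw [ih _ hlen _ rfl]
          rw [pvScanRef, if_neg (fun h => hcb h.1), if_neg hcq]
          cases pvScanRef q rest with
          | none => simp
          | some v => simp only [Option.map_some, Option.some.injEq]; omega

lemma pvBScanRef (q : Char) (hq : q ≠ '\\') (tail : List Char) (consumed : Int) :
    pvBScan tail q consumed = (pvScanRef q tail).map (consumed + ·) :=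
  pvBScanRefAux q hq tail.length tail rfl consumed

-- A's while loop computes the reference scan on the suffix
lemma pvAScanRefAux (cs : List Char) (q : Char) (hq : q ≠ '\\') :
    ∀ (d : ℕ) (k : ℕ), cs.length - k ≤ d →
      pvAScan cs q (k : Int) =
        match pvScanRef q (cs.drop k) with
        | none => (cs.length : Int)
        | some c => (k : Int) + c := by
  intro d
  induction d with
  | zero =>
    intro k hk
    have hge : cs.length ≤ k := by omega
    rw [pvAScan, dif_neg (show ¬((k : Int) < (cs.length : Int)) by omega)]
    rw [List.drop_eq_nil_of_le hge]
    simp [pvScanRef]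
  | succ d ih =>
    intro k hk
    by_cases hlt : k < cs.length
    · have hdrop : cs.drop k = cs[k] :: cs.drop (k + 1) := List.drop_eq_getElem_cons hlt
      have hget : PySem.List.pyGetD cs (k : Int) ' ' = cs[k] := by
        rw [PySem.List.pyGetD_natCast]; exact List.getD_eq_getElem cs ' ' hlt
      rw [pvAScan, dif_pos (show ((k : Int) < (cs.length : Int)) by omega)]
      rw [hget, hdrop]
      by_cases h1 : cs[k] = '\\' ∧ (k : Int) + 1 < (cs.length : Int)
      · rw [if_pos h1]
        have hk1 : k + 1 < cs.length := by omega
        have hrest : cs.drop (k + 1) ≠ [] := by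
          intro h; have := List.drop_eq_nil_iff.1 h; omega
        have htail : (cs.drop (k + 1)).tail = cs.drop (k + 2) := by
          rw [List.tail_drop]
        rw [pvScanRef, if_pos ⟨h1.1, hrest⟩, htail]
        have hc2 : ((k : Int) + 2) = ((k + 2 : ℕ) : Int) := by push_cast; ring
        rw [hc2, ih (k + 2) (by omega)]
        cases pvScanRef q (cs.drop (k + 2)) with
        | none => simp
        | some v => simp only [Option.map_some]; push_cast; ring
      · rw [if_neg h1]
        by_cases h2 : cs[k] = q
        · rw [if_pos h2]
          rw [pvScanRef, if_neg (by rw [h2]; exact fun hc => hq hc.1), if_pos h2]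
        · rw [if_neg h2]
          have hguard : ¬(cs[k] = '\\' ∧ cs.drop (k + 1) ≠ []) := by
            rintro ⟨hb1, hb2⟩
            have hk1 : k + 1 < cs.length := by
              by_contra hcon
              exact hb2 (List.drop_eq_nil_of_le (by omega))
            exact h1 ⟨hb1, by omega⟩
          rw [pvScanRef, if_neg hguard, if_neg h2]
          have hc1 : ((k : Int) + 1) = ((k + 1 : ℕ) : Int) := by push_cast; ring
          rw [hc1, ih (k + 1) (by omega)]
          cases pvScanRef q (cs.drop (k + 1)) with
          | none => simp
          | some v => simp only [Option.map_some]; push_cast; ring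
    · have hge : cs.length ≤ k := by omega
      rw [pvAScan, dif_neg (show ¬((k : Int) < (cs.length : Int)) by omega)]
      rw [List.drop_eq_nil_of_le hge]
      simp [pvScanRef]

lemma pvAScanRef (cs : List Char) (q : Char) (hq : q ≠ '\\') (k : ℕ) :
    pvAScan cs q (k : Int) =
      match pvScanRef q (cs.drop k) with
      | none => (cs.length : Int)
      | some c => (k : Int) + c :=
  pvAScanRefAux cs q hq cs.length k (by omega)

lemma pvAScanRefInt (cs : List Char) (q : Char) (hq : q ≠ '\\') (j : Int) (hj : 0 ≤ j) :
    pvAScan cs q j =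
      match pvScanRef q (cs.drop j.toNat) with
      | none => (cs.length : Int)
      | some c => j + c := by
  have h := pvAScanRef cs q hq j.toNat
  rw [Int.toNat_of_nonneg hj] at h
  exact h

-- the quote-handling tails agree (iA / iB are the two fall-through return values)
lemma pvQuoteEq (cs : List Char) (st iA iB : Int) (h0 : 0 ≤ st)
    (hfall : ¬(PySem.List.pyGetD cs st ' ' = '\'' ∨ PySem.List.pyGetD cs st ' ' = '"') → iA = iB) :
    (if PySem.List.pyGetD cs st ' ' = '\'' ∨ PySem.List.pyGetD cs st ' ' = '"' then
       if (PySem.List.pyGetD cs st ' ' = '"' ∨ PySem.List.pyGetD cs st ' ' = '\'') ∧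
           st + 2 < (cs.length : Int) ∧
           PySem.List.slice cs (some st) (some (st + 3)) =
             [PySem.List.pyGetD cs st ' ', PySem.List.pyGetD cs st ' ', PySem.List.pyGetD cs st ' '] then
         (if PySem.Chars.findFrom cs
               [PySem.List.pyGetD cs st ' ', PySem.List.pyGetD cs st ' ', PySem.List.pyGetD cs st ' ']
               (st + 3) none = -1 then (cs.length : Int)
          else PySem.Chars.findFrom cs
               [PySem.List.pyGetD cs st ' ', PySem.List.pyGetD cs st ' ', PySem.List.pyGetD cs st ' ']
               (st + 3) none + 3)
       else pvAScan cs (PySem.List.pyGetD cs st ' ') (st + 1)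
     else iA)
    =
    (if ¬(PySem.List.pyGetD cs st ' ' = '\'' ∨ PySem.List.pyGetD cs st ' ' = '"') then iB
     else if PySem.List.slice cs (some st) (some (st + 3)) =
             [PySem.List.pyGetD cs st ' ', PySem.List.pyGetD cs st ' ', PySem.List.pyGetD cs st ' '] then
       (if PySem.Chars.findFrom cs
             [PySem.List.pyGetD cs st ' ', PySem.List.pyGetD cs st ' ', PySem.List.pyGetD cs st ' ']
             (st + 3) none = -1 then (cs.length : Int)
        else PySem.Chars.findFrom cs
             [PySem.List.pyGetD cs st ' ', PySem.List.pyGetD cs st ' ', PySem.List.pyGetD cs st ' ']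
             (st + 3) none + 3)
     else (pvBScan (PySem.List.slice cs (some (st + 1)) none) (PySem.List.pyGetD cs st ' ') 0).elim
            (cs.length : Int) (fun body => st + 1 + body)) := by
  by_cases hq : PySem.List.pyGetD cs st ' ' = '\'' ∨ PySem.List.pyGetD cs st ' ' = '"'
  · rw [if_pos hq, if_neg (not_not_intro hq)]
    have hsl : PySem.List.slice cs (some st) (some (st + 3)) = (cs.drop st.toNat).take 3 := by
      rw [PySem.List.slice_toNat cs h0 (show (0:Int) ≤ st + 3 by omega)]
      congr 1; omega
    by_cases h3 : PySem.List.slice cs (some st) (some (st + 3)) =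
        [PySem.List.pyGetD cs st ' ', PySem.List.pyGetD cs st ' ', PySem.List.pyGetD cs st ' ']
    · have hlen3 : st + 2 < (cs.length : Int) := by
        have hl := congrArg List.length h3
        rw [hsl] at hl
        simp only [List.length_take, List.length_drop, List.length_cons, List.length_nil] at hl
        omega
      rw [if_pos ⟨hq.elim Or.inr Or.inl, hlen3, h3⟩, if_pos h3]
    · rw [if_neg (show ¬((PySem.List.pyGetD cs st ' ' = '"' ∨ PySem.List.pyGetD cs st ' ' = '\'') ∧
            st + 2 < (cs.length : Int) ∧
            PySem.List.slice cs (some st) (some (st + 3)) =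
              [PySem.List.pyGetD cs st ' ', PySem.List.pyGetD cs st ' ', PySem.List.pyGetD cs st ' '])
          from fun hand => h3 hand.2.2), if_neg h3]
      have hq' : PySem.List.pyGetD cs st ' ' ≠ '\\' := by
        rcases hq with h | h <;> (rw [h]; decide)
      rw [PySem.List.slice_from cs (show (0:Int) ≤ st + 1 by omega)]
      rw [pvBScanRef _ hq' _ 0]
      rw [pvAScanRefInt cs _ hq' (st + 1) (by omega)]
      cases pvScanRef (PySem.List.pyGetD cs st ' ') (cs.drop (st + 1).toNat) with
      | none => simp
      | some v => simp only [Option.map_some, Option.elim_some]; ring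
  · rw [if_neg hq, if_pos hq]
    exact hfall hq

-- the fall-through parts of the two mains agree
lemma pvTailEq (cs : List Char) (i : Int) (h0 : 0 ≤ i) (_hn : i < (cs.length : Int)) :
    pvARest cs i = pvBTail cs i (PySem.List.pyGetD cs i ' ')
      (if i + 1 < (cs.length : Int) then some (PySem.List.pyGetD cs (i + 1) ' ') else none) := by
  rw [pvARest, pvBTail]
  by_cases hr : PySem.List.pyGetD cs i ' ' = 'r' ∧ i + 1 < (cs.length : Int) ∧
      (PySem.List.pyGetD cs (i + 1) ' ' = '\'' ∨ PySem.List.pyGetD cs (i + 1) ' ' = '"')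
  · have hrB : PySem.List.pyGetD cs i ' ' = 'r' ∧
        ((if i + 1 < (cs.length : Int) then some (PySem.List.pyGetD cs (i + 1) ' ') else none) = some '\'' ∨
         (if i + 1 < (cs.length : Int) then some (PySem.List.pyGetD cs (i + 1) ' ') else none) = some '"') := by
      refine ⟨hr.1, ?_⟩
      rw [if_pos hr.2.1]
      rcases hr.2.2 with h | h
      · exact Or.inl (by rw [h])
      · exact Or.inr (by rw [h])
    rw [if_pos hr, if_pos hrB]
    exact pvQuoteEq cs (i + 1) (i + 1) i (by omega) (fun hnq => absurd hr.2.2 hnq)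
  · have hrB : ¬(PySem.List.pyGetD cs i ' ' = 'r' ∧
        ((if i + 1 < (cs.length : Int) then some (PySem.List.pyGetD cs (i + 1) ' ') else none) = some '\'' ∨
         (if i + 1 < (cs.length : Int) then some (PySem.List.pyGetD cs (i + 1) ' ') else none) = some '"')) := by
      rintro ⟨hh, hsome⟩
      by_cases hi1 : i + 1 < (cs.length : Int)
      · rw [if_pos hi1] at hsome
        exact hr ⟨hh, hi1, hsome.imp Option.some.inj Option.some.inj⟩
      · rw [if_neg hi1] at hsome
        rcases hsome with h | h <;> cases h
    rw [if_neg hr, if_neg hrB]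
    exact pvQuoteEq cs i i i h0 (fun _ => rfl)

-- ===== VERDICT (by name: the statement is the Claim_ definition above) =====
theorem skip_string_or_comment_py_spec : Claim_equal_skip_string_or_comment_py := by
  intro s i _hdom hpre
  unfold Spec_skip_string_or_comment_py
  unfold Pre_skip_string_or_comment_py at hpre
  rw [skip_string_or_comment_py, skip_string_or_comment_py_alt]
  by_cases hge : i ≥ (s.toList.length : Int)
  · rw [if_pos hge, if_pos hge]
  · rw [if_neg hge, if_neg hge]
    have hn : i < (s.toList.length : Int) := by omega
    by_cases hs : PySem.List.pyGetD s.toList i ' ' = '/' ∧ i + 1 < (s.toList.length : Int)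
    · have hnxt : (if i + 1 < (s.toList.length : Int)
          then some (PySem.List.pyGetD s.toList (i + 1) ' ') else none)
          = some (PySem.List.pyGetD s.toList (i + 1) ' ') := if_pos hs.2
      rw [if_pos hs, hnxt]
      by_cases h2 : PySem.List.pyGetD s.toList (i + 1) ' ' = '/'
      · rw [if_pos h2, if_pos (show PySem.List.pyGetD s.toList i ' ' = '/' ∧
            some (PySem.List.pyGetD s.toList (i + 1) ' ') = some '/' from ⟨hs.1, by rw [h2]⟩)]
      · rw [if_neg h2, if_neg (show ¬(PySem.List.pyGetD s.toList i ' ' = '/' ∧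
            some (PySem.List.pyGetD s.toList (i + 1) ' ') = some '/')
            from fun h => h2 (Option.some.inj h.2))]
        by_cases h3 : PySem.List.pyGetD s.toList (i + 1) ' ' = '*'
        · rw [if_pos h3, if_pos (show PySem.List.pyGetD s.toList i ' ' = '/' ∧
              some (PySem.List.pyGetD s.toList (i + 1) ' ') = some '*' from ⟨hs.1, by rw [h3]⟩)]
        · rw [if_neg h3, if_neg (show ¬(PySem.List.pyGetD s.toList i ' ' = '/' ∧
              some (PySem.List.pyGetD s.toList (i + 1) ' ') = some '*')
              from fun h => h3 (Option.some.inj h.2))]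
          rw [pvTailEq s.toList i hpre hn, hnxt]
    · rw [if_neg hs]
      have hB1 : ¬(PySem.List.pyGetD s.toList i ' ' = '/' ∧
          (if i + 1 < (s.toList.length : Int)
           then some (PySem.List.pyGetD s.toList (i + 1) ' ') else none) = some '/') := by
        rintro ⟨hh, hx⟩
        by_cases hi1 : i + 1 < (s.toList.length : Int)
        · exact hs ⟨hh, hi1⟩
        · rw [if_neg hi1] at hx; cases hx
      have hB2 : ¬(PySem.List.pyGetD s.toList i ' ' = '/' ∧
          (if i + 1 < (s.toList.length : Int)
           then some (PySem.List.pyGetD s.toList (i + 1) ' ') else none) = some '*') := by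
        rintro ⟨hh, hx⟩
        by_cases hi1 : i + 1 < (s.toList.length : Int)
        · exact hs ⟨hh, hi1⟩
        · rw [if_neg hi1] at hx; cases hx
      rw [if_neg hB1, if_neg hB2]
      exact pvTailEq s.toList i hpre hn
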